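-- pv_equiv track=rewrite | github.com/Kr68l/Task-1--Anagrams | Anagrams.py | reversed_text
-- ===== SOURCE A (Python) =====
-- from string import punctuation, digits
--
-- def reversed_text(text):
--     lst = []
--     qw = set.union(set(punctuation), set(digits))
--
--     for word in text.split(' '):
--         sort = [i for i in word if i not in qw]
--
--         for i in word:
--             if i not in qw:
--                 lst.append(sort.pop())
--             else:
--                 lst.append(i)
--
--         lst.append(' ')
--
--     return ''.join(lst[:len(lst)-1])
-- ===== SOURCE B (Python) =====
-- from string import punctuation, digits
--
-- def reversed_text(text):
--     qw = set.union(set(punctuation), set(digits))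
--     words = []
--     for word in text.split(' '):
--         chars = list(word)
--         i, j = 0, len(chars) - 1
--         while i < j:
--             if chars[i] in qw:
--                 i += 1
--             elif chars[j] in qw:
--                 j -= 1
--             else:
--                 chars[i], chars[j] = chars[j], chars[i]
--                 i += 1
--                 j -= 1
--         words.append(''.join(chars))
--     return ' '.join(words)
-- ===== Notes on version B (the rewrite author's own statement) =====
-- stated objective: alternative
-- what changed: B reverses the letter subsequence of each word in place with two pointers that skip punctuation/digit positions, instead of A's extract-letters-then-pop-off-a-stack pass, and joins words with ' '.join.
import Mathlib
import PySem

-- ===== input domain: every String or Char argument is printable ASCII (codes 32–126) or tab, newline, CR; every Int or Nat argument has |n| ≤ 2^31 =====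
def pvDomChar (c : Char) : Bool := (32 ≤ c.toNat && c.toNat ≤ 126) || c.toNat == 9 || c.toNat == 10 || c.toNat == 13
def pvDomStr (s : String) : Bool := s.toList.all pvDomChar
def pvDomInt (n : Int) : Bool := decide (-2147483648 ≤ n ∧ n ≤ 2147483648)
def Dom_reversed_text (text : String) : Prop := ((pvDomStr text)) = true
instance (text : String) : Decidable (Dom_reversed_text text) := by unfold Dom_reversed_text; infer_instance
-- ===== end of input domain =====

-- B reverses each word's letters in place with two pointers skipping punctuation/digits,
-- instead of A's extract-letters-then-pop pass; same O(n) cost, alternative algorithm.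

-- ===== PORT A =====
-- 'c in qw' for qw = set(punctuation) | set(digits): exact — that set is the ASCII
-- codes 33..126 minus the letters (65..90, 97..122).
def isQw (c : Char) : Bool :=
  (33 ≤ c.toNat && c.toNat ≤ 47) || (48 ≤ c.toNat && c.toNat ≤ 57) ||
  (58 ≤ c.toNat && c.toNat ≤ 64) || (91 ≤ c.toNat && c.toNat ≤ 96) ||
  (123 ≤ c.toNat && c.toNat ≤ 126)

-- sort = [i for i in word if i not in qw]
def pvLetters (w : List Char) : List Char := w.filter (fun c => !isQw c)

-- the inner 'for i in word' loop; s is the mutable list 'sort', pop() takes the LAST element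
def pvALoop : List Char → List Char → List Char
  | [], _ => []
  | c :: w, s =>
    if isQw c then c :: pvALoop w s
    else
      match s.getLast? with
      | some r => r :: pvALoop w s.dropLast      -- lst.append(sort.pop())
      | none => pvALoop w s                      -- IndexError in Python; unreachable: 'sort' holds exactly the remaining letters

-- the outer 'for word in …' loop building lst (each word followed by ' ')
def pvAWords : List (List Char) → List Char
  | [] => []
  | w :: ws => (pvALoop w (pvLetters w) ++ [' ']) ++ pvAWords ws

def reversed_text (text : String) : String :=
  String.mk (PySem.List.slice (pvAWords (PySem.Chars.splitOn text.toList [' '])) none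
    (some (((pvAWords (PySem.Chars.splitOn text.toList [' '])).length : Int) - 1)))   -- ''.join(lst[:len(lst)-1])

-- ===== PORT B =====
-- the two-pointer while loop; i, j stay in range 0 ≤ i < j ≤ len-1 whenever an index is
-- read, so Nat indices with getD are exact (for len = 0 Python's j = -1 and our j = 0
-- both make the loop body never run)
def pvTp (cs : List Char) (i j : Nat) : List Char :=
  if h : i < j then
    if isQw (cs.getD i ' ') then pvTp cs (i + 1) j
    else if isQw (cs.getD j ' ') then pvTp cs i (j - 1)
    else pvTp ((cs.set i (cs.getD j ' ')).set j (cs.getD i ' ')) (i + 1) (j - 1)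
  else cs
termination_by j - i
decreasing_by all_goals omega

def reversed_text_alt (text : String) : String :=
  String.mk (PySem.Chars.join [' ']
    ((PySem.Chars.splitOn text.toList [' ']).map (fun w => pvTp w 0 (w.length - 1))))

-- ===== PRECONDITION & SPEC =====
def Spec_reversed_text (text : String) (out : String) : Prop := out = reversed_text_alt text
instance (text : String) (out : String) : Decidable (Spec_reversed_text text out) := by unfold Spec_reversed_text; infer_instance

-- ===== CLAIM (what is proved, stated in full; the proofs are below) =====
def Claim_equal_reversed_text : Prop := ∀ (text : String), Dom_reversed_text text → Spec_reversed_text text (reversed_text text)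

-- ===== LEMMAS AND PROOFS =====

-- the common specification of one transformed word: the letters of w, reversed, laid
-- back into the letter positions of w (rs is the stream of letters still to place)
def pvFill : List Char → List Char → List Char
  | [], _ => []
  | c :: cs, rs =>
    if isQw c then c :: pvFill cs rs
    else
      match rs with
      | [] => c :: pvFill cs []
      | r :: rs' => r :: pvFill cs rs'

theorem pvALoop_eq_fill (w : List Char) : ∀ s : List Char,
    s.length = (pvLetters w).length → pvALoop w s = pvFill w s.reverse := by
  induction w with
  | nil => intro s _; rfl
  | cons c w ih =>
    intro s hs
    by_cases hc : isQw c
    · have : pvLetters (c :: w) = pvLetters w := by simp [pvLetters, hc]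
      simp only [pvALoop, pvFill, hc, if_pos, if_true]
      exact congrArg (c :: ·) (ih s (by rw [hs, this]))
    · have hlen : s.length = (pvLetters w).length + 1 := by
        rw [hs]; simp [pvLetters, hc]
      have hne : s ≠ [] := by intro h; simp [h] at hlen
      obtain ⟨s', r, rfl⟩ : ∃ s' r, s = s' ++ [r] := by
        rcases List.eq_nil_or_concat s with h | ⟨s', r, h⟩
        · exact absurd h hne
        · exact ⟨s', r, by simpa [List.concat_eq_append] using h⟩
      have hlast : (s' ++ [r]).getLast? = some r := by simp
      have hdrop : (s' ++ [r]).dropLast = s' := by simp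
      simp only [pvALoop, hc, if_neg, Bool.false_eq_true, if_false, hlast, hdrop]
      have ihs : pvALoop w s' = pvFill w s'.reverse := by
        apply ih; simpa using hlen
      simp [pvFill, hc, ihs]

theorem pvFill_append_qw (d : Char) (hd : isQw d = true) :
    ∀ (x rs : List Char), pvFill (x ++ [d]) rs = pvFill x rs ++ [d] := by
  intro x
  induction x with
  | nil => intro rs; simp [pvFill, hd]
  | cons c x ih =>
    intro rs
    by_cases hc : isQw c
    · simp [pvFill, hc, ih]
    · cases rs with
      | nil => simp [pvFill, hc, ih]
      | cons r rs' => simp [pvFill, hc, ih]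

theorem pvFill_append_letter (d c : Char) (hd : ¬ isQw d = true) :
    ∀ (x rs : List Char), rs.length = (pvLetters x).length →
      pvFill (x ++ [d]) (rs ++ [c]) = pvFill x rs ++ [c] := by
  intro x
  induction x with
  | nil =>
    intro rs h
    have : rs = [] := List.eq_nil_of_length_eq_zero (by simpa [pvLetters] using h)
    subst this; simp [pvFill, hd]
  | cons e x ih =>
    intro rs h
    by_cases he : isQw e
    · have : pvLetters (e :: x) = pvLetters x := by simp [pvLetters, he]
      simp [pvFill, he, ih rs (by rw [h, this])]
    · have hlen : rs.length = (pvLetters x).length + 1 := by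
        rw [h]; simp [pvLetters, he]
      cases rs with
      | nil => simp at hlen
      | cons r rs' =>
        simp only [List.cons_append, pvFill, he, if_neg, Bool.false_eq_true, if_false]
        exact congrArg (r :: ·) (ih rs' (by simpa using hlen))

theorem pvGetAt (pre : List Char) (x : Char) (t : List Char) (d : Char) :
    (pre ++ x :: t).getD pre.length d = x := by
  induction pre with
  | nil => rfl
  | cons p pre ih => simpa using ih

theorem pvSetAt (pre : List Char) (x : Char) (t : List Char) (y : Char) :
    (pre ++ x :: t).set pre.length y = pre ++ y :: t := by
  induction pre with
  | nil => rfl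
  | cons p pre ih => simpa using ih

theorem pvTp_spec : ∀ (n : Nat) (mid pre suf : List Char), mid.length ≤ n →
    pvTp (pre ++ mid ++ suf) pre.length (pre.length + mid.length - 1) =
      pre ++ pvFill mid (pvLetters mid).reverse ++ suf := by
  intro n
  induction n with
  | zero =>
    intro mid pre suf h
    have : mid = [] := List.eq_nil_of_length_eq_zero (Nat.le_zero.mp h)
    subst this
    rw [pvTp]
    simp [pvFill]
  | succ n ih =>
    intro mid pre suf h
    match mid with
    | [] => rw [pvTp]; simp [pvFill]
    | [c] =>
      rw [pvTp]
      have hnl : ¬ pre.length < pre.length + [c].length - 1 := by simp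
      rw [dif_neg hnl]
      by_cases hc : isQw c
      · simp [pvFill, hc]
      · simp [pvFill, pvLetters, hc]
    | c :: r :: rest =>
      -- mid = c :: (m ++ [d])
      obtain ⟨m, d, hmd⟩ : ∃ m d, r :: rest = m ++ [d] := by
        rcases List.eq_nil_or_concat (r :: rest) with hx | ⟨m, d, hx⟩
        · simp at hx
        · exact ⟨m, d, by simpa [List.concat_eq_append] using hx⟩
      rw [hmd]
      rw [pvTp]
      have hlen2 : (c :: (m ++ [d])).length = m.length + 2 := by simp
      rw [hlen2]
      have hidx : pre.length + (m.length + 2) - 1 = pre.length + m.length + 1 := by omega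
      rw [hidx]
      have hij : pre.length < pre.length + m.length + 1 := by omega
      rw [dif_pos hij]
      have hgi : (pre ++ (c :: (m ++ [d])) ++ suf).getD pre.length ' ' = c := by
        have := pvGetAt pre c ((m ++ [d]) ++ suf) ' '
        simpa using this
      have hgj : (pre ++ (c :: (m ++ [d])) ++ suf).getD (pre.length + m.length + 1) ' ' = d := by
        have h0 := pvGetAt (pre ++ (c :: m)) d suf ' '
        have e : (pre ++ (c :: m)) ++ d :: suf = pre ++ (c :: (m ++ [d])) ++ suf := by simp
        rw [e] at h0
        have e2 : (pre ++ (c :: m)).length = pre.length + m.length + 1 := by simp; omega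
        rw [e2] at h0
        exact h0
      rw [hgi, hgj]
      have hcanc : pre.length + m.length + 1 - 1 = pre.length + m.length := by omega
      by_cases hc : isQw c
      · -- skip left
        rw [if_pos hc]
        have e : pre ++ (c :: (m ++ [d])) ++ suf = (pre ++ [c]) ++ (m ++ [d]) ++ suf := by simp
        have e2 : pre.length + 1 = (pre ++ [c]).length := by simp
        have e3 : pre.length + m.length + 1 = (pre ++ [c]).length + (m ++ [d]).length - 1 := by
          simp; omega
        rw [e, e2, e3, ih (m ++ [d]) (pre ++ [c]) suf (by have hml := congrArg List.length hmd; simp at h hml ⊢; omega)]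
        have hl : pvLetters (c :: (m ++ [d])) = pvLetters (m ++ [d]) := by
          simp [pvLetters, hc]
        simp [hl, pvFill, hc]
      · rw [if_neg (by simp [hc])]
        by_cases hdq : isQw d
        · -- skip right
          rw [if_pos hdq, hcanc]
          have e : pre ++ (c :: (m ++ [d])) ++ suf = pre ++ (c :: m) ++ (d :: suf) := by simp
          have e3 : pre.length + m.length = pre.length + (c :: m).length - 1 := by simp
          rw [e, e3, ih (c :: m) pre (d :: suf) (by have hml := congrArg List.length hmd; simp at h hml ⊢; omega)]
          have hl : pvLetters (c :: (m ++ [d])) = pvLetters (c :: m) := by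
            simp only [pvLetters, ← List.cons_append, List.filter_append]
            simp [hdq]
          rw [hl, ← List.cons_append, pvFill_append_qw d hdq (c :: m) (pvLetters (c :: m)).reverse]
          simp
        · -- swap
          rw [if_neg (by simp [hdq]), hcanc]
          have hset : ((pre ++ (c :: (m ++ [d])) ++ suf).set pre.length d).set
              (pre.length + m.length + 1) c = pre ++ (d :: (m ++ [c])) ++ suf := by
            have e1 : pre ++ (c :: (m ++ [d])) ++ suf = pre ++ c :: ((m ++ [d]) ++ suf) := by simp
            rw [e1, pvSetAt pre c ((m ++ [d]) ++ suf) d]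
            have e2 : pre ++ d :: ((m ++ [d]) ++ suf) = (pre ++ (d :: m)) ++ d :: suf := by simp
            have e4 : pre.length + m.length + 1 = (pre ++ (d :: m)).length := by simp; omega
            rw [e2, e4, pvSetAt (pre ++ (d :: m)) d suf c]
            simp
          rw [hset]
          have e : pre ++ (d :: (m ++ [c])) ++ suf = (pre ++ [d]) ++ m ++ (c :: suf) := by simp
          have e2 : pre.length + 1 = (pre ++ [d]).length := by simp
          have e3 : pre.length + m.length = (pre ++ [d]).length + m.length - 1 := by simp
          rw [e, e2, e3, ih m (pre ++ [d]) (c :: suf) (by have hml := congrArg List.length hmd; simp at h hml ⊢; omega)]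
          have hl : pvLetters (c :: (m ++ [d])) = c :: ((pvLetters m) ++ [d]) := by
            simp [pvLetters, List.filter_append, hc, hdq]
          rw [hl]
          have hrev : (c :: ((pvLetters m) ++ [d])).reverse = d :: ((pvLetters m).reverse ++ [c]) := by
            simp
          rw [hrev]
          simp only [pvFill, hc, Bool.false_eq_true, if_false]
          rw [pvFill_append_letter d c hdq m (pvLetters m).reverse (by simp)]
          simp

-- one word: A's pass and B's two-pointer loop both produce pvFill of the reversed letters
theorem pvWord_eq (w : List Char) :
    pvALoop w (pvLetters w) = pvTp w 0 (w.length - 1) := by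
  have hb := pvTp_spec w.length w [] [] (le_refl _)
  simp only [List.nil_append, List.append_nil, List.length_nil, Nat.zero_add] at hb
  rw [hb, pvALoop_eq_fill w (pvLetters w) rfl]

-- the flat lst of A, for a nonempty word list, is B's ' '-join plus a trailing space
theorem pvAWords_eq (ws : List (List Char)) (h : ws ≠ []) :
    pvAWords ws = PySem.Chars.join [' '] (ws.map (fun w => pvALoop w (pvLetters w))) ++ [' '] := by
  induction ws with
  | nil => exact absurd rfl h
  | cons w ws ih =>
    cases ws with
    | nil => simp [pvAWords, PySem.Chars.join_singleton]
    | cons w' ws' =>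
      have ih' := ih (by simp)
      simp only [pvAWords] at ih' ⊢
      rw [ih']
      simp only [List.map_cons]
      rw [PySem.Chars.join_cons_cons]
      simp

theorem pvSlice_join (ws : List (List Char)) :
    PySem.List.slice (pvAWords ws) none (some (((pvAWords ws).length : Int) - 1)) =
      PySem.Chars.join [' '] (ws.map (fun w => pvALoop w (pvLetters w))) := by
  cases ws with
  | nil =>
    simp only [pvAWords, List.length_nil]
    rw [show ((0 : Nat) : Int) - 1 = -1 by rfl, PySem.List.slice_to_neg_one]
    simp [PySem.Chars.join, List.intercalate]
  | cons w ws =>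
    rw [pvAWords_eq (w :: ws) (by simp)]
    have hlen : (((PySem.Chars.join [' '] ((w :: ws).map (fun w => pvALoop w (pvLetters w))) ++ [' ']).length : Int) - 1 =
        ((PySem.Chars.join [' '] ((w :: ws).map (fun w => pvALoop w (pvLetters w)))).length : Int)) := by
      simp
    rw [hlen, PySem.List.slice_to_natCast]
    simp

-- ===== VERDICT (by name: the statement is the Claim_ definition above) =====
theorem reversed_text_spec : Claim_equal_reversed_text := by
  intro text _
  unfold Spec_reversed_text reversed_text reversed_text_alt
  rw [pvSlice_join]
  congr 2
  exact List.map_congr_left (fun w _ => pvWord_eq w)
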